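-- pv_equiv track=rewrite | github.com/busportals/portals-mcp | tools/blender_to_portals.py | deduplicate_names
-- ===== SOURCE A (Python) =====
-- def deduplicate_names(names: list[str]) -> list[str]:
--     """
--     Given a list of sanitised names, append _2, _3 ... for any duplicates so
--     every entry is unique.  Preserves order.
--     """
--     seen: dict[str, int] = {}
--     result: list[str] = []
--     for name in names:
--         if name not in seen:
--             seen[name] = 1
--             result.append(name)
--         else:
--             seen[name] += 1
--             unique = f"{name}_{seen[name]}"
--             while unique in seen:
--                 seen[name] += 1
--                 unique = f"{name}_{seen[name]}"
--             seen[unique] = 1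
--             result.append(unique)
--     return result
-- ===== SOURCE B (Python) =====
-- def deduplicate_names(names: list[str]) -> list[str]:
--     """
--     Given a list of sanitised names, append _2, _3 ... for any duplicates so
--     every entry is unique.  Preserves order.
--     """
--     used: set[str] = set()
--     result: list[str] = []
--     for name in names:
--         if name in used:
--             # a free suffix exists among the len(used)+1 candidates 2..len(used)+2
--             # (pigeonhole), so next() never exhausts the generator
--             name = next(c for c in (f"{name}_{k}" for k in range(2, len(used) + 3))
--                         if c not in used)
--         used.add(name)
--         result.append(name)
--     return result
-- ===== Notes on version B (the rewrite author's own statement) =====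
-- stated objective: simpler
-- what changed: B drops A's per-name counter dictionary (high-water mark plus sentinel entries for generated names) and its unbounded while-loop, keeping only a set of used names; on a collision it picks the first free candidate from the bounded generator f'{name}_{k}' for k in range(2, len(used)+3) via next() (pigeonhole guarantees one is free), with a single add/append at the end of the loop body instead of duplicated branches; equivalent because a suffix once used never becomes free, so the fresh scan from 2 skips exactly the numbers A's persisted counter skips.
import Mathlib
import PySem

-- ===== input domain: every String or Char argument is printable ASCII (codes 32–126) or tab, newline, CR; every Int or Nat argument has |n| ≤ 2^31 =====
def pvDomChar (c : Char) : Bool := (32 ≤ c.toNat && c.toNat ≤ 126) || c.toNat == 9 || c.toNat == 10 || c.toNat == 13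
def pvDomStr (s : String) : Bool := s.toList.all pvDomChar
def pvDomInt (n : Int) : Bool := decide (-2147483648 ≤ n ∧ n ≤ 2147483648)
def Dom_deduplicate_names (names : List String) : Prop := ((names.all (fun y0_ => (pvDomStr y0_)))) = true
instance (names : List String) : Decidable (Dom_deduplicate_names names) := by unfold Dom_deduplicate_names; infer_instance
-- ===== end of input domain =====

-- B replaces A's per-name counter dict and unbounded while-loop by a used-set and a bounded
-- first-free scan over range(2, len(used)+3); equivalent because a used suffix never frees up
-- (objective: simpler).

-- f"{name}_{c}" — string interpolation is concatenation; built on the List Char side (exact)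
def pvFmt (name : String) (c : Int) : String :=
  String.ofList (name.toList ++ ('_' :: PySem.Int.toChars c))

-- ===== PORT A =====
-- the 'while unique in seen' loop of A; in Python it terminates because the candidate strings
-- are pairwise distinct, so a free one is reached within len(seen) steps; fuel len(seen)+1
-- realises exactly that bound (the fuel=0 branch is unreachable)
def a_loop (seen : PySem.Dict String Int) (name : String) (unique : String) (fuel : Nat) :
    PySem.Dict String Int × String :=
  match fuel with
  | 0 => (seen, unique)
  | fuel + 1 =>
    if seen.contains unique then
      let seen := seen.insert name (seen.getD name 0 + 1)
      a_loop seen name (pvFmt name (seen.getD name 0)) fuel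
    else (seen, unique)

def a_step (st : PySem.Dict String Int × List String) (name : String) :
    PySem.Dict String Int × List String :=
  let (seen, result) := st
  if seen.contains name = false then
    (seen.insert name 1, result ++ [name])
  else
    let seen1 := seen.insert name (seen.getD name 0 + 1)
    let (seen2, unique) := a_loop seen1 name (pvFmt name (seen1.getD name 0)) (seen1.size + 1)
    (seen2.insert unique 1, result ++ [unique])

def deduplicate_names (names : List String) : List String :=
  (names.foldl a_step (PySem.Dict.empty, [])).2

-- ===== PORT B =====
-- the generator expression 'next(c for c in (f"{name}_{k}" for k in range(2, len(used)+3))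
-- if c not in used)': materialised as find? over the mapped range; the .getD fallback is the
-- (provably unreachable, by pigeonhole) StopIteration case
def b_pick (used : PySem.Set String) (name : String) : String :=
  ((((PySem.List.pyRange 2 ((used.length : Int) + 3) 1).map (pvFmt name)).find?
      (fun c => !PySem.Set.contains used c)).getD name)

def b_step (st : PySem.Set String × List String) (name : String) :
    PySem.Set String × List String :=
  let (used, result) := st
  let chosen := if PySem.Set.contains used name then b_pick used name else name
  (PySem.Set.add used chosen, result ++ [chosen])

def deduplicate_names_alt (names : List String) : List String :=
  (names.foldl b_step (PySem.Set.empty, [])).2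

-- ===== PRECONDITION & SPEC =====
def Spec_deduplicate_names (names : List String) (out : List String) : Prop := out = deduplicate_names_alt names
instance (names : List String) (out : List String) : Decidable (Spec_deduplicate_names names out) := by unfold Spec_deduplicate_names; infer_instance

-- ===== CLAIM =====
def Claim_equal_deduplicate_names : Prop := ∀ (names : List String), Dom_deduplicate_names names → Spec_deduplicate_names names (deduplicate_names names)

-- ===== LEMMAS AND PROOFS =====

-- the invariant tying A's counter dict to B's used-set after any prefix of the input:
-- same keys (in the same order), keys unique, and every counter value c recorded for a name
-- certifies that all suffixed variants name_2 … name_c are already keys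
def pvInv (seen : PySem.Dict String Int) (used : PySem.Set String) : Prop :=
  seen.keys = used ∧ seen.keys.Nodup ∧
  ∀ name c, seen.get? name = some c → 1 ≤ c ∧
    ∀ j : Int, 2 ≤ j → j ≤ c → seen.contains (pvFmt name j) = true

lemma digitChar_inj (x y : Nat) (hx : x < 10) (hy : y < 10)
    (h : Nat.digitChar x = Nat.digitChar y) : x = y := by
  interval_cases x <;> interval_cases y <;> simp_all [Nat.digitChar]

lemma toDigits_inj (a b : Nat) (h : Nat.toDigits 10 a = Nat.toDigits 10 b) : a = b := by
  induction a using Nat.strong_induction_on generalizing b with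
  | _ a ih =>
    rw [Nat.toDigits_eq_if (by norm_num), Nat.toDigits_eq_if (by norm_num) (n := b)] at h
    split_ifs at h with h1 h2 h2
    · exact digitChar_inj a b h1 h2 (List.singleton_injective h)
    · exfalso
      have hp := Nat.length_toDigits_pos (b := 10) (n := b / 10)
      have hl := congrArg List.length h
      simp only [List.length_append, List.length_singleton] at hl
      omega
    · exfalso
      have hp := Nat.length_toDigits_pos (b := 10) (n := a / 10)
      have hl := congrArg List.length h
      simp only [List.length_append, List.length_singleton] at hl
      omega
    · obtain ⟨h3, h4⟩ := List.append_inj' h (by simp)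
      have hd : a / 10 = b / 10 := ih (a / 10) (by omega) (b / 10) h3
      have hm : a % 10 = b % 10 :=
        digitChar_inj _ _ (Nat.mod_lt _ (by norm_num)) (Nat.mod_lt _ (by norm_num))
          (List.singleton_injective h4)
      omega

lemma pvFmt_inj (name : String) (a b : Int) (ha : 0 ≤ a) (hb : 0 ≤ b)
    (h : pvFmt name a = pvFmt name b) : a = b := by
  have h' := congrArg String.toList h
  simp only [pvFmt, String.toList_ofList] at h'
  have h2 := List.append_cancel_left h'
  simp only [List.cons.injEq, true_and] at h2
  simp only [PySem.Int.toChars, if_neg (by omega : ¬ a < 0), if_neg (by omega : ¬ b < 0)] at h2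
  have := toDigits_inj _ _ h2
  omega

lemma exists_free (keys : List String) (name : String) :
    ∃ m : Nat, m ≤ keys.length ∧ pvFmt name (2 + (m : Int)) ∉ keys := by
  by_contra hcon
  have hcon2 : ∀ m : Nat, m ≤ keys.length → pvFmt name (2 + (m : Int)) ∈ keys := by
    intro m hm
    by_contra hx
    exact hcon ⟨m, hm, hx⟩
  have hinj : Function.Injective (fun m : Nat => pvFmt name (2 + (m : Int))) := by
    intro x y hxy
    have h0 : (0:Int) ≤ 2 + (x : Int) := by positivity
    have h1 : (0:Int) ≤ 2 + (y : Int) := by positivity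
    have := pvFmt_inj name (2 + (x : Int)) (2 + (y : Int)) h0 h1 hxy
    omega
  have hsub : ((List.range (keys.length + 1)).map (fun m : Nat => pvFmt name (2 + (m : Int)))) ⊆ keys := by
    intro x hx
    rw [List.mem_map] at hx
    obtain ⟨m, hm, rfl⟩ := hx
    rw [List.mem_range] at hm
    exact hcon2 m (by omega)
  have hnd := List.Nodup.map hinj (List.nodup_range (n := keys.length + 1))
  have := List.Subperm.length_le (List.subperm_of_subset hnd hsub)
  simp at this

lemma contains_insert_of_contains (d : PySem.Dict String Int) (k : String)
    (hk : d.contains k = true) (v : Int) (x : String) :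
    (d.insert k v).contains x = d.contains x := by
  rw [PySem.Dict.contains_insert]
  cases hx : (x == k) <;> simp_all

lemma a_loop_eq (t : Nat) : ∀ (s : PySem.Dict String Int) (name : String) (c : Int) (fuel : Nat),
    s.contains name = true →
    (∀ i : Nat, i < t → s.contains (pvFmt name (c + (i : Int))) = true) →
    s.contains (pvFmt name (c + (t : Int))) = false →
    t < fuel →
    a_loop (s.insert name c) name (pvFmt name c) fuel
      = (s.insert name (c + (t : Int)), pvFmt name (c + (t : Int))) := by
  induction t with
  | zero =>
    intro s name c fuel hname h1 h2 hf
    obtain ⟨f, rfl⟩ : ∃ f, fuel = f + 1 := ⟨fuel - 1, by omega⟩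
    simp only [Nat.cast_zero, add_zero] at h2 ⊢
    simp only [a_loop, contains_insert_of_contains s name hname, h2]
    simp
  | succ t ih =>
    intro s name c fuel hname h1 h2 hf
    obtain ⟨f, rfl⟩ : ∃ f, fuel = f + 1 := ⟨fuel - 1, by omega⟩
    have h0 : s.contains (pvFmt name c) = true := by
      have := h1 0 (by omega); simpa using this
    simp only [a_loop, contains_insert_of_contains s name hname, h0, if_true,
      PySem.Dict.getD_insert_self, PySem.Dict.insert_insert_self]
    have hrec := ih s name (c + 1) f hname
      (fun i hi => by
        have := h1 (i + 1) (by omega)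
        have hcast : c + ((i : Int) + 1) = c + 1 + (i : Int) := by ring
        rw [Nat.cast_add, Nat.cast_one, hcast] at this
        exact this)
      (by
        have hcast : c + ((t : Int) + 1) = c + 1 + (t : Int) := by ring
        rw [Nat.cast_add, Nat.cast_one, hcast] at h2
        exact h2)
      (by omega)
    rw [hrec]
    have hcast : c + 1 + (t : Int) = c + ((t : Int) + 1) := by ring
    rw [hcast]
    simp

-- find? over the mapped range returns the candidate at the first index whose predicate holds
lemma find_range_eq (q : String → Bool) (f : Int → String) :
    ∀ (t : Nat) (a b : Int),
    a + (t : Int) < b →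
    (∀ i : Nat, i < t → q (f (a + (i : Int))) = false) →
    q (f (a + (t : Int))) = true →
    ((PySem.List.pyRange a b 1).map f).find? q = some (f (a + (t : Int))) := by
  intro t
  induction t with
  | zero =>
    intro a b hlt h1 h2
    rw [PySem.List.pyRange_one_cons (by omega)]
    simp only [Nat.cast_zero, add_zero] at h2 ⊢
    simp [h2]
  | succ t ih =>
    intro a b hlt h1 h2
    rw [PySem.List.pyRange_one_cons (by omega)]
    have h0 : q (f a) = false := by
      have := h1 0 (by omega); simpa using this
    simp only [List.map_cons, List.find?_cons, h0]
    have hrec := ih (a + 1) b (by push_cast at hlt ⊢; omega)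
      (fun i hi => by
        have := h1 (i + 1) (by omega)
        have hcast : a + ((i : Int) + 1) = a + 1 + (i : Int) := by ring
        rw [Nat.cast_add, Nat.cast_one, hcast] at this
        exact this)
      (by
        have hcast : a + ((t : Int) + 1) = a + 1 + (t : Int) := by ring
        rw [Nat.cast_add, Nat.cast_one, hcast] at h2
        exact h2)
    rw [hrec]
    have hcast : a + 1 + (t : Int) = a + ((t : Nat) + 1 : Nat) := by push_cast; ring
    rw [hcast]

lemma size_eq_keys_length (d : PySem.Dict String Int) : d.size = d.keys.length := by
  simp [PySem.Dict.size, PySem.Dict.keys]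

lemma step_eq (seen : PySem.Dict String Int) (used : PySem.Set String) (res : List String)
    (name : String) (h : pvInv seen used) :
    (a_step (seen, res) name).2 = (b_step (used, res) name).2 ∧
    pvInv (a_step (seen, res) name).1 (b_step (used, res) name).1 := by
  obtain ⟨hkeys, hnd, hinv⟩ := h
  have hmem : ∀ x, PySem.Set.contains used x = seen.contains x := by
    intro x
    rw [PySem.Dict.contains_eq_decide_mem_keys, hkeys]
    cases hx : PySem.Set.contains used x with
    | true => simp [(PySem.Set.contains_iff used x).mp hx]
    | false =>
      have hxm : x ∉ used := fun hm => by
        rw [(PySem.Set.contains_iff used x).mpr hm] at hx; cases hx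
      simp [hxm]
  by_cases hc : seen.contains name = true
  · -- duplicate: both search for the first free suffix
    have hcS : PySem.Set.contains used name = true := by rw [hmem]; exact hc
    obtain ⟨c0, hg⟩ := Option.isSome_iff_exists.mp
      (by rw [← PySem.Dict.contains_eq_isSome_get? seen name]; exact hc)
    have hgD : seen.getD name 0 = c0 := PySem.Dict.getD_of_get?_eq_some seen 0 hg
    obtain ⟨hc1, hocc⟩ := hinv name c0 hg
    obtain ⟨m0, hm0_le, hm0_free⟩ := exists_free seen.keys name
    have hP : ∃ m : Nat, pvFmt name (2 + (m : Int)) ∉ seen.keys := ⟨m0, hm0_free⟩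
    set tB := Nat.find hP with htBdef
    have htB_le : tB ≤ seen.keys.length := le_trans (Nat.find_min' hP hm0_free) hm0_le
    have htB_free : pvFmt name (2 + (tB : Int)) ∉ seen.keys := Nat.find_spec hP
    have htB_occ : ∀ i : Nat, i < tB → pvFmt name (2 + (i : Int)) ∈ seen.keys := by
      intro i hi
      have := Nat.find_min hP hi
      simpa using this
    have hcontains_mem : ∀ x, seen.contains x = decide (x ∈ seen.keys) := fun x =>
      PySem.Dict.contains_eq_decide_mem_keys seen x
    have hfree' : seen.contains (pvFmt name (2 + (tB : Int))) = false := by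
      rw [hcontains_mem]; simp [htB_free]
    have hocc' : ∀ i : Nat, i < tB → seen.contains (pvFmt name (2 + (i : Int))) = true := by
      intro i hi; rw [hcontains_mem]; simp [htB_occ i hi]
    have hc0tB : c0 - 1 ≤ (tB : Int) := by
      by_contra hlt
      have h2le : (2 : Int) ≤ 2 + (tB : Int) := by omega
      have hle : 2 + (tB : Int) ≤ c0 := by omega
      have := hocc (2 + (tB : Int)) h2le hle
      rw [hfree'] at this; cases this
    -- the index where A's scan (starting at c0+1) meets the first free suffix 2+tB
    set tA : Nat := tB - (c0.toNat - 1) with htAdef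
    have hA : c0 + 1 + (tA : Int) = 2 + (tB : Int) := by omega
    set u : String := pvFmt name (2 + (tB : Int)) with hudef
    -- A's side
    have hloopA := a_loop_eq tA seen name (c0 + 1) ((seen.insert name (c0 + 1)).size + 1) hc
      (fun i hi => by
        have hocc2 := hocc' (c0.toNat - 1 + i) (by omega)
        have : (2 : Int) + ((c0.toNat - 1 + i : Nat) : Int) = c0 + 1 + (i : Int) := by omega
        rwa [this] at hocc2)
      (by rw [hA]; exact hfree')
      (by
        rw [size_eq_keys_length, PySem.Dict.keys_insert_of_contains _ _ hc]
        omega)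
    have haA : a_step (seen, res) name
        = ((seen.insert name (2 + (tB : Int))).insert u 1, res ++ [u]) := by
      simp only [a_step, hc, Bool.true_eq_false, if_false, hgD,
        PySem.Dict.getD_insert_self, hloopA, hA]
      rfl
    -- B's side: the bounded scan finds the same first free suffix
    have hulen : used.length = seen.keys.length := by rw [hkeys]
    have hfind := find_range_eq (fun c => !PySem.Set.contains used c) (pvFmt name)
      tB 2 ((used.length : Int) + 3)
      (by rw [hulen]; omega)
      (fun i hi => by
        have hct : PySem.Set.contains used (pvFmt name (2 + (i : Int))) = true := by
          rw [hmem]; exact hocc' i hi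
        simp [(PySem.Set.contains_iff used _).mp hct])
      (by
        have hcf : PySem.Set.contains used (pvFmt name (2 + (tB : Int))) = false := by
          rw [hmem]; exact hfree'
        simp only [Bool.not_eq_true']
        exact hcf)
    have haB : b_step (used, res) name = (PySem.Set.add used u, res ++ [u]) := by
      simp only [b_step, b_pick, hcS, if_true, hfind, Option.getD_some, hudef]
    rw [haA, haB]
    refine ⟨rfl, ?_, ?_, ?_⟩
    · -- keys line up: both append the fresh name u
      have hu_not1 : (seen.insert name (2 + (tB : Int))).contains u = false := by
        rw [contains_insert_of_contains seen name hc, hcontains_mem]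
        simp [htB_free]
      rw [PySem.Dict.keys_insert_of_not_contains _ _ hu_not1,
        PySem.Dict.keys_insert_of_contains _ _ hc, hkeys,
        PySem.Set.add_of_not_mem (by rw [← hkeys]; exact htB_free)]
    · -- keys stay unique
      have hu_not1 : (seen.insert name (2 + (tB : Int))).contains u = false := by
        rw [contains_insert_of_contains seen name hc, hcontains_mem]
        simp [htB_free]
      rw [PySem.Dict.keys_insert_of_not_contains _ _ hu_not1,
        PySem.Dict.keys_insert_of_contains _ _ hc]
      simp [List.nodup_append, hnd]
      exact fun a ha he => htB_free (he ▸ ha)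
    · -- the counter clause
      have hu_not1 : (seen.insert name (2 + (tB : Int))).contains u = false := by
        rw [contains_insert_of_contains seen name hc, hcontains_mem]
        simp [htB_free]
      have hkeysN : ((seen.insert name (2 + (tB : Int))).insert u 1).keys
          = seen.keys ++ [u] := by
        rw [PySem.Dict.keys_insert_of_not_contains _ _ hu_not1,
          PySem.Dict.keys_insert_of_contains _ _ hc]
      have hcontN : ∀ x, ((seen.insert name (2 + (tB : Int))).insert u 1).contains x
          = decide (x ∈ seen.keys ∨ x = u) := by
        intro x
        rw [PySem.Dict.contains_eq_decide_mem_keys, hkeysN]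
        simp
      have hname_mem : name ∈ seen.keys := by
        rw [hcontains_mem] at hc; simpa using hc
      have hu_ne : u ≠ name := fun he => htB_free (he ▸ hname_mem)
      intro n' c' hg'
      rw [PySem.Dict.get?_insert] at hg'
      by_cases hn'u : n' = u
      · rw [if_pos hn'u] at hg'
        obtain rfl : c' = 1 := by simpa using hg'.symm
        exact ⟨le_refl 1, fun j hj1 hj2 => absurd (le_trans hj1 hj2) (by norm_num)⟩
      · rw [if_neg hn'u, PySem.Dict.get?_insert] at hg'
        by_cases hn'n : n' = name
        · rw [if_pos hn'n] at hg'
          obtain rfl : c' = 2 + (tB : Int) := by simpa using hg'.symm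
          subst hn'n
          refine ⟨by omega, fun j hj1 hj2 => ?_⟩
          rw [hcontN]
          rcases eq_or_lt_of_le hj2 with he | hlt
          · rw [he]
            simp only [decide_eq_true_eq]
            exact Or.inr rfl
          · have hj_occ := htB_occ (j - 2).toNat (by omega)
            have : (2 : Int) + (((j - 2).toNat : Nat) : Int) = j := by omega
            rw [this] at hj_occ
            simp [hj_occ]
        · rw [if_neg hn'n] at hg'
          obtain ⟨hc1', hocc1'⟩ := hinv n' c' hg'
          refine ⟨hc1', fun j hj1 hj2 => ?_⟩
          have := hocc1' j hj1 hj2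
          rw [hcontains_mem] at this
          rw [hcontN]
          simp only [decide_eq_true_eq] at this ⊢
          exact Or.inl this
  · -- fresh name: both append it as-is
    have hcF : seen.contains name = false := by
      cases hx : seen.contains name
      · rfl
      · exact absurd hx hc
    have hcS : PySem.Set.contains used name = false := by rw [hmem]; exact hcF
    have hnot_mem : name ∉ seen.keys := by
      rw [PySem.Dict.contains_eq_decide_mem_keys] at hcF
      simpa using hcF
    have haA : a_step (seen, res) name = (seen.insert name 1, res ++ [name]) := by
      simp only [a_step, hcF, if_true]
    have haB : b_step (used, res) name = (PySem.Set.add used name, res ++ [name]) := by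
      simp only [b_step, hcS, Bool.false_eq_true, if_false]
    rw [haA, haB]
    refine ⟨rfl, ?_, ?_, ?_⟩
    · rw [PySem.Dict.keys_insert_of_not_contains _ _ hcF, hkeys,
        PySem.Set.add_of_not_mem (by rw [← hkeys]; exact hnot_mem)]
    · rw [PySem.Dict.keys_insert_of_not_contains _ _ hcF]
      simp [List.nodup_append, hnd]
      exact fun a ha he => hnot_mem (he ▸ ha)
    · intro n' c' hg'
      rw [PySem.Dict.get?_insert] at hg'
      by_cases hn'n : n' = name
      · rw [if_pos hn'n] at hg'
        obtain rfl : c' = 1 := by simpa using hg'.symm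
        exact ⟨le_refl 1, fun j hj1 hj2 => absurd (le_trans hj1 hj2) (by norm_num)⟩
      · rw [if_neg hn'n] at hg'
        obtain ⟨hc1', hocc1'⟩ := hinv n' c' hg'
        refine ⟨hc1', fun j hj1 hj2 => ?_⟩
        have := hocc1' j hj1 hj2
        rw [PySem.Dict.contains_insert, this]
        simp

lemma fold_eq (names : List String) : ∀ (seen : PySem.Dict String Int) (used : PySem.Set String)
    (res : List String), pvInv seen used →
    (names.foldl a_step (seen, res)).2 = (names.foldl b_step (used, res)).2 := by
  induction names with
  | nil => intro _ _ _ _; rfl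
  | cons name rest ih =>
    intro seen used res h
    obtain ⟨hres, hinv'⟩ := step_eq seen used res name h
    simp only [List.foldl_cons]
    rw [show a_step (seen, res) name
          = ((a_step (seen, res) name).1, (a_step (seen, res) name).2) from rfl,
        show b_step (used, res) name
          = ((b_step (used, res) name).1, (b_step (used, res) name).2) from rfl, hres]
    exact ih _ _ _ hinv'

-- ===== VERDICT =====
theorem deduplicate_names_spec : Claim_equal_deduplicate_names := by
  intro names _
  unfold Spec_deduplicate_names deduplicate_names deduplicate_names_alt
  refine fold_eq names _ _ _ ⟨?_, ?_, ?_⟩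
  · rfl
  · simp [PySem.Dict.empty]
  · intro n c hg
    simp [PySem.Dict.get?_empty] at hg
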